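-- pv_equiv track=rewrite | github.com/arnavggupta/freshcart-data-platform_team1 | scripts/freshcart_utils.py | count_duplicates
-- ===== SOURCE A (Python) =====
-- def count_duplicates(data, key_column):
--     """
--     Counts duplicate values
--     """
--     seen = set()
--     duplicates = 0
--
--     for row in data:
--         val = row[key_column]
--         if val in seen:
--             duplicates += 1
--         else:
--             seen.add(val)
--
--     return duplicates
-- ===== SOURCE B (Python) =====
-- def count_duplicates(data, key_column):
--     """
--     Counts duplicate values
--     """
--     vals = [row[key_column] for row in data]
--     return len(vals) - len(set(vals))
-- ===== Notes on version B (the rewrite author's own statement) =====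
-- stated objective: simpler
-- what changed: B replaces A's stateful seen-set loop with if/else counting by two staged passes: extract the key column, then compute len(vals) - len(set(vals)).
import Mathlib
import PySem

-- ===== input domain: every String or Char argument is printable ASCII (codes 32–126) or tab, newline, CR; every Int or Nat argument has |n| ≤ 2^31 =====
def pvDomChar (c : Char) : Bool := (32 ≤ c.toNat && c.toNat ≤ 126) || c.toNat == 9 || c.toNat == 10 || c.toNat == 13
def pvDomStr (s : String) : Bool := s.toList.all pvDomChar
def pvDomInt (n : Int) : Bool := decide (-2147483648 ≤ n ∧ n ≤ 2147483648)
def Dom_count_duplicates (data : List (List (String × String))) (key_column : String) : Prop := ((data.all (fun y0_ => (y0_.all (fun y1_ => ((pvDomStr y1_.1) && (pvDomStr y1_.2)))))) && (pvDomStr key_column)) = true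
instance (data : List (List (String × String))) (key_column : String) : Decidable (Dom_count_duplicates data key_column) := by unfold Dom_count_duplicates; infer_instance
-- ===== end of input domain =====

-- B computes len(vals) - len(set(vals)) over the extracted key column in staged passes,
-- instead of A's seen-set loop with an if/else duplicate counter (simpler decomposition, same cost).


-- ===== PORT A =====
-- A's loop: seen = set(); for row in data: val = row[key_column]; branch on membership.
-- row[key_column] raising KeyError is modelled by the Option result (none = KeyError).
def cdLoopA : List (List (String × String)) → String → PySem.Set String → Int → Option Int
  | [], _, _, duplicates => some duplicates
  | row :: rest, key, seen, duplicates =>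
    match (PySem.Dict.mk row).get? key with
    | none => none
    | some val =>
      if PySem.Set.contains seen val then cdLoopA rest key seen (duplicates + 1)
      else cdLoopA rest key (PySem.Set.add seen val) duplicates

def count_duplicates (data : List (List (String × String))) (key_column : String) : Int :=
  (cdLoopA data key_column PySem.Set.empty 0).getD 0  -- the default is never reached under Pre_

-- ===== PORT B =====
-- B pass 1: the comprehension [row[key_column] for row in data] (none = KeyError on some row)
def cdVals : List (List (String × String)) → String → Option (List String)
  | [], _ => some []
  | row :: rest, key => do
    let v ← (PySem.Dict.mk row).get? key
    let vs ← cdVals rest key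
    pure (v :: vs)

-- B pass 2: len(vals) - len(set(vals))
def count_duplicates_alt (data : List (List (String × String))) (key_column : String) : Int :=
  match cdVals data key_column with
  | none => 0  -- never reached under Pre_
  | some vals => (vals.length : Int) - ((PySem.Set.ofList vals).length : Int)

-- ===== PRECONDITION & SPEC =====
-- Pre_ excludes exactly the inputs where row[key_column] raises KeyError (some row lacks the key).
def Pre_count_duplicates (data : List (List (String × String))) (key_column : String) : Prop :=
  ∀ row ∈ data, key_column ∈ row.map (·.1)
instance (data : List (List (String × String))) (key_column : String) : Decidable (Pre_count_duplicates data key_column) := by unfold Pre_count_duplicates; infer_instance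

def pvWitness_count_duplicates : (List (List (String × String))) × String :=
  ([[("id", "1"), ("name", "a")], [("id", "1"), ("name", "b")], [("id", "2"), ("name", "c")]], "id")

def Spec_count_duplicates (data : List (List (String × String))) (key_column : String) (out : Int) : Prop := out = count_duplicates_alt data key_column
instance (data : List (List (String × String))) (key_column : String) (out : Int) : Decidable (Spec_count_duplicates data key_column out) := by unfold Spec_count_duplicates; infer_instance

-- ===== CLAIM (what is proved, stated in full; the proofs are below) =====
def Claim_equal_count_duplicates : Prop := ∀ (data : List (List (String × String))) (key_column : String), Dom_count_duplicates data key_column → Pre_count_duplicates data key_column → Spec_count_duplicates data key_column (count_duplicates data key_column)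

-- ===== LEMMAS AND PROOFS =====

-- the key-column value of a row (well-defined under Pre_)
def rowVal (key : String) (row : List (String × String)) : String :=
  ((PySem.Dict.mk row).get? key).getD ""

theorem rowVal_get? {key : String} {row : List (String × String)}
    (h : key ∈ row.map (·.1)) : (PySem.Dict.mk row).get? key = some (rowVal key row) := by
  have : (PySem.Dict.mk row).get? key ≠ none := by
    intro hg
    rw [PySem.Dict.get?_eq_none_iff_not_mem_keys] at hg
    exact hg (by simpa [PySem.Dict.keys] using h)
  cases hg : (PySem.Dict.mk row).get? key with
  | none => exact absurd hg this
  | some v => simp [rowVal, hg]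

-- the pure A-loop over the extracted values
def loopAV : List String → PySem.Set String → Int → Int
  | [], _, duplicates => duplicates
  | v :: rest, seen, duplicates =>
    if PySem.Set.contains seen v then loopAV rest seen (duplicates + 1)
    else loopAV rest (PySem.Set.add seen v) duplicates

theorem cdLoopA_eq_loopAV (key : String) :
    ∀ (data : List (List (String × String))) (seen : PySem.Set String) (dup : Int),
      (∀ row ∈ data, key ∈ row.map (·.1)) →
      cdLoopA data key seen dup = some (loopAV (data.map (rowVal key)) seen dup)
  | [], _, _, _ => rfl
  | row :: rest, seen, dup, h => by
    have hrow := rowVal_get? (h row (by simp))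
    have hrest : ∀ r ∈ rest, key ∈ r.map (·.1) := fun r hr => h r (by simp [hr])
    simp only [cdLoopA, hrow, List.map_cons, loopAV]
    split <;> exact cdLoopA_eq_loopAV key rest _ _ hrest

theorem cdVals_eq_map (key : String) :
    ∀ (data : List (List (String × String))),
      (∀ row ∈ data, key ∈ row.map (·.1)) →
      cdVals data key = some (data.map (rowVal key))
  | [], _ => rfl
  | row :: rest, h => by
    have hrow := rowVal_get? (h row (by simp))
    have hrest : ∀ r ∈ rest, key ∈ r.map (·.1) := fun r hr => h r (by simp [hr])
    simp [cdVals, hrow, cdVals_eq_map key rest hrest]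

-- A's invariant: duplicates counted = values consumed minus fresh distinct values added to seen
theorem loopAV_closed :
    ∀ (vals : List String) (seen : PySem.Set String) (dup : Int),
      loopAV vals seen dup =
        dup + (vals.length : Int) - (((PySem.Set.update seen vals).length : Int) - (seen.length : Int))
  | [], seen, dup => by simp [loopAV, PySem.Set.update_nil]
  | v :: rest, seen, dup => by
    rw [PySem.Set.update_cons]
    simp only [loopAV]
    split
    · next hc =>
      have hm : v ∈ seen := List.mem_of_elem_eq_true hc
      rw [loopAV_closed rest seen (dup + 1), PySem.Set.add_of_mem hm]
      simp; ring
    · next hc =>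
      have hm : v ∉ seen := fun hv => hc (List.elem_eq_true_of_mem hv)
      rw [loopAV_closed rest (PySem.Set.add seen v) dup, PySem.Set.add_of_not_mem hm]
      simp; ring

-- ===== VERDICT (by name: the statement is the Claim_ definition above) =====
theorem count_duplicates_spec : Claim_equal_count_duplicates := by
  intro data key _hdom hpre
  unfold Spec_count_duplicates count_duplicates count_duplicates_alt
  rw [cdLoopA_eq_loopAV key data PySem.Set.empty 0 hpre, cdVals_eq_map key data hpre]
  set vals := data.map (rowVal key) with hvals
  rw [Option.getD_some, loopAV_closed vals PySem.Set.empty 0]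
  show _ = (vals.length : Int) - ((PySem.Set.ofList vals).length : Int)
  simp [PySem.Set.empty, PySem.Set.update_nil_left]
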